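-- pv_equiv track=rewrite | github.com/demanghon/contree.ai | apps/benchmark_solver.py | count_trumps
-- ===== SOURCE A (Python) =====
-- def count_trumps(hand, trump_suit):
--     count = 0
--     # Valet and 9 checks
--     has_valet = False
--     has_nine = False
--
--     # Iterate bits
--     for i in range(32):
--         if (hand & (1 << i)) != 0:
--             suit = i // 8
--             rank = i % 8
--             if suit == trump_suit:
--                 count += 1
--                 if rank == 4: # Jack
--                     has_valet = True
--                 if rank == 2: # 9 (if trump)
--                     has_nine = True
--     return count, has_valet, has_nine
-- ===== SOURCE B (Python) =====
-- def count_trumps(hand, trump_suit):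
--     if trump_suit < 0 or trump_suit > 3:
--         return 0, False, False
--     block = (hand >> (trump_suit * 8)) & 0xFF
--     return block.bit_count(), bool(block & 0x10), bool(block & 0x04)
-- ===== Notes on version B (the rewrite author's own statement) =====
-- stated objective: idiomatic
-- what changed: A scans all 32 bits in a loop maintaining count/jack/nine flags; B extracts the trump suit's byte with one shift-and-mask and reads the answer off it with int.bit_count() and two direct bit tests, with no loop or state.
import Mathlib
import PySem

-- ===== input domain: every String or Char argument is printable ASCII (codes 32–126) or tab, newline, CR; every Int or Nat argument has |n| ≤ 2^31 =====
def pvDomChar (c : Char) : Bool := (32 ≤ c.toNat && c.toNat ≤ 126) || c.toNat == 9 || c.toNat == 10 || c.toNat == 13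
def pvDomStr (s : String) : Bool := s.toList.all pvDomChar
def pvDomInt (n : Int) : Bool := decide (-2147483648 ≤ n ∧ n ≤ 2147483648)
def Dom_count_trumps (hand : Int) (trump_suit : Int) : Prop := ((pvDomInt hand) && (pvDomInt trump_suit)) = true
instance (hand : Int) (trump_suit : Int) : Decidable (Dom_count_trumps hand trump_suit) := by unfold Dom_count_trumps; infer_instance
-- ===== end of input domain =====

-- B replaces A's 32-bit scan with loop-free extraction of the trump suit's byte: popcount plus two direct bit tests.


-- ===== PORT A =====
def count_trumps (hand : Int) (trump_suit : Int) : Int × Bool × Bool :=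
  -- count = 0; has_valet = False; has_nine = False; for i in range(32): ...
  (PySem.List.pyRange 0 32 1).foldl (fun st i =>
    if PySem.Int.band hand ((1:Int) <<< i.toNat) ≠ 0 then   -- i ∈ [0,32), so i.toNat is exact
      let suit := PySem.Int.floordiv i 8
      let rank := PySem.Int.mod i 8
      if suit = trump_suit then
        (st.1 + 1,
         (if rank = 4 then true else st.2.1),
         (if rank = 2 then true else st.2.2))
      else st
    else st) (0, false, false)

-- ===== PORT B =====
def count_trumps_alt (hand : Int) (trump_suit : Int) : Int × Bool × Bool :=
  if trump_suit < 0 ∨ 3 < trump_suit then (0, false, false)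
  else
    -- here 0 ≤ trump_suit ≤ 3, so (trump_suit * 8).toNat is the exact Python shift amount
    let block := PySem.Int.band (hand >>> (trump_suit * 8).toNat) 0xFF
    ((PySem.Int.bitCount block : Int),
     decide (PySem.Int.band block 0x10 ≠ 0),
     decide (PySem.Int.band block 0x04 ≠ 0))

-- ===== PRECONDITION & SPEC =====
def Spec_count_trumps (hand : Int) (trump_suit : Int) (out : Int × Bool × Bool) : Prop := out = count_trumps_alt hand trump_suit
instance (hand : Int) (trump_suit : Int) (out : Int × Bool × Bool) : Decidable (Spec_count_trumps hand trump_suit out) := by unfold Spec_count_trumps; infer_instance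

-- ===== CLAIM (what is proved, stated in full; the proofs are below) =====
def Claim_equal_count_trumps : Prop := ∀ (hand : Int) (trump_suit : Int), Dom_count_trumps hand trump_suit → Spec_count_trumps hand trump_suit (count_trumps hand trump_suit)

-- ===== LEMMAS AND PROOFS =====

-- floor division of -N-1 by a positive d, as Python's >> computes it
theorem pv_neg_ediv (N d : Nat) (hd : 0 < d) : ((-(N:Int) - 1)) / (d:Int) = -((N / d : Nat) : Int) - 1 := by
  have hNd : N % d < d := Nat.mod_lt N hd
  have hE : d * (N / d) + N % d = N := Nat.div_add_mod N d
  have hE' : ((N / d : Nat) : Int) * (d : Int) + ((N % d : Nat) : Int) = (N : Int) := by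
    push_cast
    have := congrArg (Nat.cast : Nat → Int) hE; push_cast at this; linarith
  have key : (-(N:Int) - 1) = ((d - 1 - N % d : Nat) : Int) + (-((N / d : Nat) : Int) - 1) * (d : Int) := by
    have h1 : ((d - 1 - N % d : Nat) : Int) = (d : Int) - 1 - ((N % d : Nat) : Int) := by omega
    rw [h1]; ring_nf
    nlinarith [hE']
  rw [key, Int.add_mul_ediv_right _ _ (by exact_mod_cast hd.ne' : (d:Int) ≠ 0),
      Int.ediv_eq_zero_of_lt (by positivity) (by exact_mod_cast (by omega : d - 1 - N % d < d))]
  ring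

-- Python's a & (1 << i), for every integer a, as floor-div arithmetic
theorem pv_band_two_pow (a : Int) (i : Nat) :
    PySem.Int.band a ((1:Int) <<< ((i : Nat) : Int)) = a / 2 ^ i % 2 * 2 ^ i := by
  have h1 : ((1:Int) <<< ((i : Nat) : Int)) = ((2 ^ i : Nat) : Int) := by
    rw [Int.shiftLeft_natCast_right, Int.shiftLeft_eq]; push_cast; ring
  have h2 : ((2:Int) ^ i) = ((2 ^ i : Nat) : Int) := by push_cast; ring
  rcases le_or_gt 0 a with ha | ha
  · obtain ⟨A, rfl⟩ := Int.eq_ofNat_of_zero_le ha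
    have hcast : ((A / 2 ^ i : Nat) : Int) = (A : Int) / (2:Int) ^ i := by
      rw [Int.natCast_div, ← h2]
    rw [h1, PySem.Int.band_natCast, Nat.and_two_pow, Nat.testBit_eq_decide_div_mod_eq, ← hcast]
    rcases Nat.mod_two_eq_zero_or_one (A / 2 ^ i) with h | h
    · rw [show (decide (A / 2 ^ i % 2 = 1)) = false from by simp [h],
          show ((A / 2 ^ i : Nat) : Int) % 2 = 0 from by omega]
      simp
    · rw [show (decide (A / 2 ^ i % 2 = 1)) = true from by simp [h],
          show ((A / 2 ^ i : Nat) : Int) % 2 = 1 from by omega]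
      push_cast
      simp
  · obtain ⟨N, rfl⟩ : ∃ N : Nat, a = -(N:Int) - 1 := ⟨(-a - 1).toNat, by omega⟩
    unfold PySem.Int.band
    rw [if_neg (by omega), if_pos (by rw [h1]; positivity)]
    have h3 : (-(-(N:Int) - 1) - 1).toNat = N := by omega
    rw [h3, h1, Int.toNat_natCast, Nat.two_pow_and, Nat.testBit_eq_decide_div_mod_eq, h2,
        pv_neg_ediv N (2 ^ i) (by positivity)]
    rcases Nat.mod_two_eq_zero_or_one (N / 2 ^ i) with h | h
    · rw [show (decide (N / 2 ^ i % 2 = 1)) = false from by simp [h],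
          show (-((N / 2 ^ i : Nat) : Int) - 1) % 2 = 1 from by omega]
      simp
    · rw [show (decide (N / 2 ^ i % 2 = 1)) = true from by simp [h],
          show (-((N / 2 ^ i : Nat) : Int) - 1) % 2 = 0 from by omega]
      simp

-- Python's a & 0xFF, for every integer a, is a mod 256
theorem pv_band_255 (a : Int) : PySem.Int.band a 255 = a % 256 := by
  rcases le_or_gt 0 a with ha | ha
  · obtain ⟨A, rfl⟩ := Int.eq_ofNat_of_zero_le ha
    rw [show (255:Int) = ((255:Nat):Int) from rfl, PySem.Int.band_natCast,
        show A &&& 255 = A % 256 from Nat.and_two_pow_sub_one_eq_mod A 8]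
    omega
  · obtain ⟨N, rfl⟩ : ∃ N : Nat, a = -(N:Int) - 1 := ⟨(-a - 1).toNat, by omega⟩
    unfold PySem.Int.band
    rw [if_neg (by omega), if_pos (by norm_num)]
    rw [show (-(-(N:Int) - 1) - 1).toNat = N from by omega,
        show ((255:Int)).toNat = 255 from rfl,
        show 255 &&& N = N % 256 from by rw [Nat.land_comm]; exact Nat.and_two_pow_sub_one_eq_mod N 8]
    omega

-- the index list A iterates over
theorem pv_range32 : PySem.List.pyRange 0 32 1 = ([0,1,2,3,4,5,6,7,8,9,10,11,12,13,14,15,16,17,18,19,20,21,22,23,24,25,26,27,28,29,30,31] : List Int) := by decide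

-- folding a no-op body leaves the initial state
theorem pv_foldl_id (l : List Int) (init : Int × Bool × Bool) :
    l.foldl (fun st _ => st) init = init := by
  induction l <;> simp [List.foldl, *]

-- the two ports agree once the hand is reduced to the trump suit's byte
set_option maxRecDepth 10000 in
set_option maxHeartbeats 4000000 in
theorem pv_byte_case : ∀ n : Nat, n < 256 → ∀ t : Nat, t < 4 →
    count_trumps ((n * 2 ^ (8 * t) : Nat) : Int) ((t : Nat) : Int)
      = count_trumps_alt ((n * 2 ^ (8 * t) : Nat) : Int) ((t : Nat) : Int) := by decide

theorem count_trumps_spec' : ∀ (hand : Int) (trump_suit : Int), count_trumps hand trump_suit = count_trumps_alt hand trump_suit := by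
  intro hand ts
  by_cases hts : ts < 0 ∨ 3 < ts
  · have h0 : ¬((0:Int) = ts) := by omega
    have h1 : ¬((1:Int) = ts) := by omega
    have h2 : ¬((2:Int) = ts) := by omega
    have h3 : ¬((3:Int) = ts) := by omega
    have hB : count_trumps_alt hand ts = (0, false, false) := by
      unfold count_trumps_alt; rw [if_pos hts]
    rw [hB]
    unfold count_trumps
    rw [pv_range32,
        PySem.List.foldl_congr_mem _ _ (fun (st : Int × Bool × Bool) (_ : Int) => st) _ ?_,
        pv_foldl_id]
    intro acc x hx
    fin_cases hx <;> simp [PySem.Int.floordiv, Int.fdiv_eq_ediv, h0, h1, h2, h3]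
  · have hts0 : 0 ≤ ts := by omega
    have hts3 : ts ≤ 3 := by omega
    interval_cases ts
    · obtain ⟨n, hn, hb⟩ : ∃ n : Nat, n < 256 ∧ hand / 1 % 256 = (n:Int) :=
        ⟨(hand / 1 % 256).toNat, by omega, by omega⟩
      have hA : count_trumps hand 0 = count_trumps ((n * 2 ^ (8 * 0) : Nat) : Int) 0 := by
        unfold count_trumps
        rw [pv_range32]
        refine PySem.List.foldl_congr_mem _ _ _ _ ?_
        intro acc x hx
        fin_cases hx <;>
          first
          | (rw [pv_band_two_pow, pv_band_two_pow]
             exact if_congr (by push_cast; omega) rfl rfl)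
          | simp [PySem.Int.floordiv, Int.fdiv_eq_ediv]
      have hblk : PySem.Int.band (hand >>> (((0 : Int) * 8).toNat)) 255
          = PySem.Int.band ((((n * 2 ^ (8 * 0) : Nat) : Int)) >>> (((0 : Int) * 8).toNat)) 255 := by
        rw [pv_band_255, pv_band_255, Int.shiftRight_eq_div_pow, Int.shiftRight_eq_div_pow]
        push_cast
        omega
      have hB : count_trumps_alt hand 0 = count_trumps_alt ((n * 2 ^ (8 * 0) : Nat) : Int) 0 := by
        unfold count_trumps_alt
        rw [if_neg (by omega), if_neg (by omega)]
        simp only [hblk]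
      rw [hA, hB]
      have := pv_byte_case n hn 0 (by norm_num)
      norm_num at this ⊢
      exact this
    · obtain ⟨n, hn, hb⟩ : ∃ n : Nat, n < 256 ∧ hand / 256 % 256 = (n:Int) :=
        ⟨(hand / 256 % 256).toNat, by omega, by omega⟩
      have hA : count_trumps hand 1 = count_trumps ((n * 2 ^ (8 * 1) : Nat) : Int) 1 := by
        unfold count_trumps
        rw [pv_range32]
        refine PySem.List.foldl_congr_mem _ _ _ _ ?_
        intro acc x hx
        fin_cases hx <;>
          first
          | (rw [pv_band_two_pow, pv_band_two_pow]
             exact if_congr (by push_cast; omega) rfl rfl)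
          | simp [PySem.Int.floordiv, Int.fdiv_eq_ediv]
      have hblk : PySem.Int.band (hand >>> (((1 : Int) * 8).toNat)) 255
          = PySem.Int.band ((((n * 2 ^ (8 * 1) : Nat) : Int)) >>> (((1 : Int) * 8).toNat)) 255 := by
        rw [pv_band_255, pv_band_255, Int.shiftRight_eq_div_pow, Int.shiftRight_eq_div_pow]
        push_cast
        omega
      have hB : count_trumps_alt hand 1 = count_trumps_alt ((n * 2 ^ (8 * 1) : Nat) : Int) 1 := by
        unfold count_trumps_alt
        rw [if_neg (by omega), if_neg (by omega)]
        simp only [hblk]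
      rw [hA, hB]
      have := pv_byte_case n hn 1 (by norm_num)
      norm_num at this ⊢
      exact this
    · obtain ⟨n, hn, hb⟩ : ∃ n : Nat, n < 256 ∧ hand / 65536 % 256 = (n:Int) :=
        ⟨(hand / 65536 % 256).toNat, by omega, by omega⟩
      have hA : count_trumps hand 2 = count_trumps ((n * 2 ^ (8 * 2) : Nat) : Int) 2 := by
        unfold count_trumps
        rw [pv_range32]
        refine PySem.List.foldl_congr_mem _ _ _ _ ?_
        intro acc x hx
        fin_cases hx <;>
          first
          | (rw [pv_band_two_pow, pv_band_two_pow]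
             exact if_congr (by push_cast; omega) rfl rfl)
          | simp [PySem.Int.floordiv, Int.fdiv_eq_ediv]
      have hblk : PySem.Int.band (hand >>> (((2 : Int) * 8).toNat)) 255
          = PySem.Int.band ((((n * 2 ^ (8 * 2) : Nat) : Int)) >>> (((2 : Int) * 8).toNat)) 255 := by
        rw [pv_band_255, pv_band_255, Int.shiftRight_eq_div_pow, Int.shiftRight_eq_div_pow]
        push_cast
        omega
      have hB : count_trumps_alt hand 2 = count_trumps_alt ((n * 2 ^ (8 * 2) : Nat) : Int) 2 := by
        unfold count_trumps_alt
        rw [if_neg (by omega), if_neg (by omega)]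
        simp only [hblk]
      rw [hA, hB]
      have := pv_byte_case n hn 2 (by norm_num)
      norm_num at this ⊢
      exact this
    · obtain ⟨n, hn, hb⟩ : ∃ n : Nat, n < 256 ∧ hand / 16777216 % 256 = (n:Int) :=
        ⟨(hand / 16777216 % 256).toNat, by omega, by omega⟩
      have hA : count_trumps hand 3 = count_trumps ((n * 2 ^ (8 * 3) : Nat) : Int) 3 := by
        unfold count_trumps
        rw [pv_range32]
        refine PySem.List.foldl_congr_mem _ _ _ _ ?_
        intro acc x hx
        fin_cases hx <;>
          first
          | (rw [pv_band_two_pow, pv_band_two_pow]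
             exact if_congr (by push_cast; omega) rfl rfl)
          | simp [PySem.Int.floordiv, Int.fdiv_eq_ediv]
      have hblk : PySem.Int.band (hand >>> (((3 : Int) * 8).toNat)) 255
          = PySem.Int.band ((((n * 2 ^ (8 * 3) : Nat) : Int)) >>> (((3 : Int) * 8).toNat)) 255 := by
        rw [pv_band_255, pv_band_255, Int.shiftRight_eq_div_pow, Int.shiftRight_eq_div_pow]
        push_cast
        omega
      have hB : count_trumps_alt hand 3 = count_trumps_alt ((n * 2 ^ (8 * 3) : Nat) : Int) 3 := by
        unfold count_trumps_alt
        rw [if_neg (by omega), if_neg (by omega)]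
        simp only [hblk]
      rw [hA, hB]
      have := pv_byte_case n hn 3 (by norm_num)
      norm_num at this ⊢
      exact this

-- ===== VERDICT (by name: the statement is the Claim_ definition above) =====
theorem count_trumps_spec : Claim_equal_count_trumps := by
  intro hand trump_suit _
  unfold Spec_count_trumps
  exact count_trumps_spec' hand trump_suit
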